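-- pv_equiv track=rewrite | github.com/S0NGMinHyuk/Algorithm-Coding-Test | 프로그래머스/2/49994. 방문 길이/방문 길이.py | solution
-- ===== SOURCE A (Python) =====
-- def solution(dirs):
--     answer = set()
--     pos = [0, 0]        # 현재 위치의 x좌표, y좌표
--     for move in dirs:   # dirs의 방향대로 움직이기
--         if move == "L" and pos[0] > -5:
--             # 양 방향의 진행을 모두 answer에 추가
--             answer.add((pos[0], pos[1], pos[0]-1, pos[1]))
--             answer.add((pos[0]-1, pos[1], pos[0], pos[1]))
--             pos[0] -= 1
--         elif move == "R" and pos[0] < 5: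
--             answer.add((pos[0], pos[1], pos[0]+1, pos[1]))
--             answer.add((pos[0]+1, pos[1], pos[0], pos[1]))
--             pos[0] += 1
--         elif move == "U" and pos[1] < 5:
--             answer.add((pos[0], pos[1], pos[0], pos[1]+1))
--             answer.add((pos[0], pos[1]+1, pos[0], pos[1]))
--             pos[1] += 1
--         elif move == "D" and pos[1] > -5:
--             answer.add((pos[0], pos[1], pos[0], pos[1]-1))
--             answer.add((pos[0], pos[1]-1, pos[0], pos[1]))
--             pos[1] -= 1
--
--     return len(answer)//2   # answer 집합의 요소 개수 리턴 (양방향이 모두 있으니 2로 나누기)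
-- ===== SOURCE B (Python) =====
-- def solution(dirs):
--     # Two passes: build the visited path with boundary clamping, then count
--     # canonical (sorted-pair) undirected edges between consecutive distinct points.
--     path = [(0, 0)]
--     for move in dirs:
--         x, y = path[-1]
--         if move == "L":
--             nx, ny = x - 1, y
--         elif move == "R":
--             nx, ny = x + 1, y
--         elif move == "U":
--             nx, ny = x, y + 1
--         elif move == "D":
--             nx, ny = x, y - 1
--         else:
--             nx, ny = x, y
--         if abs(nx) > 5 or abs(ny) > 5:
--             nx, ny = x, y
--         path.append((nx, ny))
--     edges = set()
--     for p, q in zip(path, path[1:]):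
--         if p != q:
--             edges.add((min(p, q), max(p, q)))
--     return len(edges)
-- ===== Notes on version B (the rewrite author's own statement) =====
-- stated objective: alternative
-- what changed: Replaces A's inline dual-orientation edge accumulation and final len//2 with a two-pass structure: first build the clamped visited path, then collect canonical (lexicographically sorted pair) undirected edges from consecutive distinct positions and return the set size directly.
import Mathlib
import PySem

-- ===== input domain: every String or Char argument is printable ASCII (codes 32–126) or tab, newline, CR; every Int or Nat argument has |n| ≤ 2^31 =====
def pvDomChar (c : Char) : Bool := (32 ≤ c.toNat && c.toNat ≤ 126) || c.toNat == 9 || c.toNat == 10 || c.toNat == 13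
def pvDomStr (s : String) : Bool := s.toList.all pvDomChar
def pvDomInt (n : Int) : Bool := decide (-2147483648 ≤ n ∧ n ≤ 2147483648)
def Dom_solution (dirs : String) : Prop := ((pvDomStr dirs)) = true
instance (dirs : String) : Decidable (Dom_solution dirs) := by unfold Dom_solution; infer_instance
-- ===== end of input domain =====

-- B re-implements A as two passes (clamped path, then canonical sorted-pair edges,
-- no //2); objective: simpler/alternative decomposition, same asymptotic cost.

-- ===== PORT A =====
-- A's loop body: state is (answer set of directed 4-tuples, x, y)
def pvStepA (st : PySem.Set (Int × Int × Int × Int) × Int × Int) (move : Char) :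
    PySem.Set (Int × Int × Int × Int) × Int × Int :=
  match st with
  | (answer, x, y) =>
    if move = 'L' ∧ x > -5 then
      (PySem.Set.add (PySem.Set.add answer (x, y, x - 1, y)) (x - 1, y, x, y), x - 1, y)
    else if move = 'R' ∧ x < 5 then
      (PySem.Set.add (PySem.Set.add answer (x, y, x + 1, y)) (x + 1, y, x, y), x + 1, y)
    else if move = 'U' ∧ y < 5 then
      (PySem.Set.add (PySem.Set.add answer (x, y, x, y + 1)) (x, y + 1, x, y), x, y + 1)
    else if move = 'D' ∧ y > -5 then
      (PySem.Set.add (PySem.Set.add answer (x, y, x, y - 1)) (x, y - 1, x, y), x, y - 1)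
    else (answer, x, y)

def solution (dirs : String) : Int :=
  let r := dirs.toList.foldl pvStepA (PySem.Set.empty, 0, 0)
  PySem.Int.floordiv (r.1.length : Int) 2

-- ===== PORT B =====
-- B's first pass: extend the path by one (possibly clamped) step
def pvStepB (path : List (Int × Int)) (move : Char) : List (Int × Int) :=
  let p := PySem.List.pyGetD path (-1) ((0 : Int), (0 : Int))
  let n : Int × Int :=
    if move = 'L' then (p.1 - 1, p.2)
    else if move = 'R' then (p.1 + 1, p.2)
    else if move = 'U' then (p.1, p.2 + 1)
    else if move = 'D' then (p.1, p.2 - 1)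
    else (p.1, p.2)
  let n' := if 5 < |n.1| ∨ 5 < |n.2| then (p.1, p.2) else n
  path ++ [n']

-- (min(p,q), max(p,q)) for tuples: lexicographic sorted pair
def pvCanon (p q : Int × Int) : (Int × Int) × (Int × Int) :=
  if p.1 < q.1 ∨ (p.1 = q.1 ∧ p.2 < q.2) then (p, q) else (q, p)

-- B's second pass: add the canonical edge of one consecutive pair (skip self-loops)
def pvAddEdge (s : PySem.Set ((Int × Int) × (Int × Int))) (pq : (Int × Int) × (Int × Int)) :
    PySem.Set ((Int × Int) × (Int × Int)) :=
  if pq.1 ≠ pq.2 then PySem.Set.add s (pvCanon pq.1 pq.2) else s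

def solution_alt (dirs : String) : Int :=
  let path := dirs.toList.foldl pvStepB [((0 : Int), (0 : Int))]
  let edges := (path.zip (PySem.List.slice path (some 1) none)).foldl pvAddEdge PySem.Set.empty
  (edges.length : Int)

-- ===== PRECONDITION & SPEC =====
def Spec_solution (dirs : String) (out : Int) : Prop := out = solution_alt dirs
instance (dirs : String) (out : Int) : Decidable (Spec_solution dirs out) := by unfold Spec_solution; infer_instance

-- ===== CLAIM (what is proved, stated in full; the proofs are below) =====
def Claim_equal_solution : Prop := ∀ (dirs : String), Dom_solution dirs → Spec_solution dirs (solution dirs)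

-- ===== LEMMAS AND PROOFS =====

def pvA (l : List Char) : PySem.Set (Int × Int × Int × Int) × Int × Int :=
  l.foldl pvStepA (PySem.Set.empty, 0, 0)

def pvPath (l : List Char) : List (Int × Int) :=
  l.foldl pvStepB [((0 : Int), (0 : Int))]

def pvEdges (path : List (Int × Int)) : PySem.Set ((Int × Int) × (Int × Int)) :=
  (path.zip path.tail).foldl pvAddEdge PySem.Set.empty

lemma pvCanon_symm (p q : Int × Int) : pvCanon q p = pvCanon p q := by
  unfold pvCanon
  rcases p with ⟨a, b⟩; rcases q with ⟨c, d⟩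
  by_cases h : a = c
  · subst h
    split_ifs with h1 h2 h2 <;> simp_all <;> omega
  · split_ifs with h1 h2 h2 <;> simp_all <;> omega

lemma pvCanon_eq (u v p q : Int × Int) (h : pvCanon u v = pvCanon p q) :
    (u = p ∧ v = q) ∨ (u = q ∧ v = p) := by
  unfold pvCanon at h
  split_ifs at h <;> simp only [Prod.ext_iff] at h ⊢ <;> tauto

-- appending one point adds exactly one consecutive pair
lemma pvZipAppend (pre : List (Int × Int)) (p q : Int × Int) :
    ((pre ++ [p]) ++ [q]).zip (((pre ++ [p]) ++ [q]).tail)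
      = (pre ++ [p]).zip ((pre ++ [p]).tail) ++ [(p, q)] := by
  induction pre with
  | nil => simp
  | cons a as ih =>
      rcases as with _ | ⟨b, bs⟩
      · simp
      · simpa using ih

lemma pvEdges_append (pre : List (Int × Int)) (p q : Int × Int) :
    pvEdges ((pre ++ [p]) ++ [q]) = pvAddEdge (pvEdges (pre ++ [p])) (p, q) := by
  unfold pvEdges
  rw [pvZipAppend, List.foldl_append]
  rfl

-- the invariant relating A's set to B's canonical edge set
def pvInv (S : PySem.Set (Int × Int × Int × Int)) (C : PySem.Set ((Int × Int) × (Int × Int))) : Prop :=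
  (∀ a b c d : Int, (a, b, c, d) ∈ S ↔ (((a, b) : Int × Int) ≠ (c, d) ∧ pvCanon (a, b) (c, d) ∈ C)) ∧
  S.length = 2 * C.length

lemma pvInv_step (S : PySem.Set (Int × Int × Int × Int)) (C : PySem.Set ((Int × Int) × (Int × Int)))
    (p q : Int × Int) (hpq : p ≠ q) (hinv : pvInv S C) :
    pvInv (PySem.Set.add (PySem.Set.add S (p.1, p.2, q.1, q.2)) (q.1, q.2, p.1, p.2))
          (PySem.Set.add C (pvCanon p q)) := by
  obtain ⟨hmem, hlen⟩ := hinv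
  constructor
  · intro a b c d
    rw [PySem.Set.mem_add, PySem.Set.mem_add, PySem.Set.mem_add, hmem]
    constructor
    · rintro ((⟨hne, hc⟩ | he) | he)
      · exact ⟨hne, Or.inl hc⟩
      · simp [Prod.ext_iff] at he
        obtain ⟨h1, h2, h3, h4⟩ := he
        subst h1; subst h2; subst h3; subst h4
        exact ⟨hpq, Or.inr rfl⟩
      · simp [Prod.ext_iff] at he
        obtain ⟨h1, h2, h3, h4⟩ := he
        subst h1; subst h2; subst h3; subst h4
        exact ⟨Ne.symm hpq, Or.inr (pvCanon_symm p q)⟩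
    · rintro ⟨hne, hc | hc⟩
      · exact Or.inl (Or.inl ⟨hne, hc⟩)
      · rcases pvCanon_eq _ _ _ _ hc with ⟨h1, h2⟩ | ⟨h1, h2⟩
        · left; right
          simp [Prod.ext_iff] at h1 h2 ⊢
          exact ⟨h1.1, h1.2, h2.1, h2.2⟩
        · right
          simp [Prod.ext_iff] at h1 h2 ⊢
          exact ⟨h1.1, h1.2, h2.1, h2.2⟩
  · by_cases hc : pvCanon p q ∈ C
    · have h1 : ((p.1, p.2, q.1, q.2) : Int × Int × Int × Int) ∈ S := by
        rw [hmem]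
        refine ⟨by simpa [Prod.ext_iff] using hpq, by simpa using hc⟩
      have h2 : ((q.1, q.2, p.1, p.2) : Int × Int × Int × Int) ∈ S := by
        rw [hmem]
        exact ⟨by simpa [Prod.ext_iff] using (Ne.symm hpq), by rw [pvCanon_symm]; simpa using hc⟩
      rw [PySem.Set.add_of_mem hc, PySem.Set.add_of_mem h1,
          PySem.Set.add_of_mem (by simpa [PySem.Set.add_of_mem h1] using h2)]
      exact hlen
    · have h1 : ((p.1, p.2, q.1, q.2) : Int × Int × Int × Int) ∉ S := by
        rw [hmem]; rintro ⟨-, hcc⟩; exact hc (by simpa using hcc)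
      have h2 : ((q.1, q.2, p.1, p.2) : Int × Int × Int × Int) ∉ S ++ [(p.1, p.2, q.1, q.2)] := by
        simp only [List.mem_append, List.mem_singleton]
        rintro (hin | he)
        · rw [hmem] at hin
          exact hc (by rw [← pvCanon_symm]; simpa using hin.2)
        · simp [Prod.ext_iff] at he
          exact hpq (Prod.ext he.1.symm he.2.1.symm)
      rw [PySem.Set.add_of_not_mem hc, PySem.Set.add_of_not_mem h1, PySem.Set.add_of_not_mem h2]
      simp [hlen]; omega

lemma pvAccept (S : PySem.Set (Int × Int × Int × Int)) (pre : List (Int × Int))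
    (x y x' y' : Int) (hpq : ((x, y) : Int × Int) ≠ (x', y'))
    (hinv : pvInv S (pvEdges (pre ++ [((x, y) : Int × Int)]))) :
    pvInv (PySem.Set.add (PySem.Set.add S (x, y, x', y')) (x', y', x, y))
          (pvEdges ((pre ++ [((x, y) : Int × Int)]) ++ [((x', y') : Int × Int)])) := by
  rw [pvEdges_append]
  have h := pvInv_step S _ (x, y) (x', y') hpq hinv
  simpa [pvAddEdge, hpq] using h

lemma pvNoop (pre : List (Int × Int)) (p : Int × Int) :
    pvEdges ((pre ++ [p]) ++ [p]) = pvEdges (pre ++ [p]) := by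
  rw [pvEdges_append]; simp [pvAddEdge]

lemma pvMain (l : List Char) :
    (∃ pre, pvPath l = pre ++ [((pvA l).2.1, (pvA l).2.2)]) ∧
    |(pvA l).2.1| ≤ 5 ∧ |(pvA l).2.2| ≤ 5 ∧
    pvInv (pvA l).1 (pvEdges (pvPath l)) := by
  induction l using List.reverseRecOn with
  | nil =>
      refine ⟨⟨[], rfl⟩, by simp [pvA], by simp [pvA], ?_, ?_⟩ <;>
        simp [pvA, pvPath, pvEdges, PySem.Set.empty]
  | append_singleton xs c ih =>
      obtain ⟨⟨pre, hpre⟩, hx, hy, hinv⟩ := ih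
      have hA : pvA (xs ++ [c]) = pvStepA (pvA xs) c := by simp [pvA]
      have hP : pvPath (xs ++ [c]) = pvStepB (pvPath xs) c := by simp [pvPath]
      rcases hS : pvA xs with ⟨S, x, y⟩
      rw [hS] at hpre hx hy hinv hA
      dsimp only at hpre hx hy hinv ⊢
      rw [abs_le] at hx hy
      have hBform : ∀ n' : Int × Int, pvStepB (pvPath xs) c
          = (pre ++ [((x, y) : Int × Int)]) ++ [n'] →
          pvPath (xs ++ [c]) = (pre ++ [((x, y) : Int × Int)]) ++ [n'] := by
        intro n' hn; rw [hP, hn]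
      by_cases hL : c = 'L'
      · by_cases hb : x > -5
        · have hcl : ¬ (5 < |(x - 1 : Int)| ∨ 5 < |(y : Int)|) := by
            simp only [not_or, not_lt, abs_le]; omega
          have hq : pvPath (xs ++ [c])
              = (pre ++ [((x, y) : Int × Int)]) ++ [((x - 1, y) : Int × Int)] := by
            apply hBform
            rw [hpre]
            simp [pvStepB, PySem.List.pyGetD_neg_one_append_singleton, hL, hcl]
          have hA' : pvA (xs ++ [c])
              = (PySem.Set.add (PySem.Set.add S (x, y, x - 1, y)) (x - 1, y, x, y), x - 1, y) := by
            rw [hA]; simp [pvStepA, hL, hb]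
          rw [hq, hA']
          refine ⟨⟨pre ++ [(x, y)], rfl⟩, (by show |(x - 1 : Int)| ≤ 5; rw [abs_le]; omega), (by show |(y : Int)| ≤ 5; rw [abs_le]; omega), ?_⟩
          exact pvAccept S pre x y (x - 1) (y) (by intro h; rw [Prod.mk.injEq] at h; omega) (hpre ▸ hinv)
        · have hcl : (5 < |(x - 1 : Int)| ∨ 5 < |(y : Int)|) := by
            rcases hx with ⟨hx1, hx2⟩; rcases hy with ⟨hy1, hy2⟩
            rw [lt_abs, lt_abs]; omega
          have hq : pvPath (xs ++ [c])
              = (pre ++ [((x, y) : Int × Int)]) ++ [((x, y) : Int × Int)] := by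
            apply hBform
            rw [hpre]
            simp [pvStepB, PySem.List.pyGetD_neg_one_append_singleton, hL, hcl]
          have hA' : pvA (xs ++ [c]) = (S, x, y) := by
            rw [hA]; simp [pvStepA, hL, hb]
          rw [hq, hA', pvNoop]
          exact ⟨⟨pre ++ [(x, y)], rfl⟩, (by show |(x : Int)| ≤ 5; rw [abs_le]; omega), (by show |(y : Int)| ≤ 5; rw [abs_le]; omega), hpre ▸ hinv⟩
      · by_cases hR : c = 'R'
        · by_cases hb : x < 5
          · have hcl : ¬ (5 < |(x + 1 : Int)| ∨ 5 < |(y : Int)|) := by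
              simp only [not_or, not_lt, abs_le]; omega
            have hq : pvPath (xs ++ [c])
                = (pre ++ [((x, y) : Int × Int)]) ++ [((x + 1, y) : Int × Int)] := by
              apply hBform
              rw [hpre]
              simp [pvStepB, PySem.List.pyGetD_neg_one_append_singleton, hR, hcl]
            have hA' : pvA (xs ++ [c])
                = (PySem.Set.add (PySem.Set.add S (x, y, x + 1, y)) (x + 1, y, x, y), x + 1, y) := by
              rw [hA]; simp [pvStepA, hR, hb]
            rw [hq, hA']
            refine ⟨⟨pre ++ [(x, y)], rfl⟩, (by show |(x + 1 : Int)| ≤ 5; rw [abs_le]; omega), (by show |(y : Int)| ≤ 5; rw [abs_le]; omega), ?_⟩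
            exact pvAccept S pre x y (x + 1) (y) (by intro h; rw [Prod.mk.injEq] at h; omega) (hpre ▸ hinv)

          · have hcl : (5 < |(x + 1 : Int)| ∨ 5 < |(y : Int)|) := by
              rcases hx with ⟨hx1, hx2⟩; rcases hy with ⟨hy1, hy2⟩
              rw [lt_abs, lt_abs]; omega
            have hq : pvPath (xs ++ [c])
                = (pre ++ [((x, y) : Int × Int)]) ++ [((x, y) : Int × Int)] := by
              apply hBform
              rw [hpre]
              simp [pvStepB, PySem.List.pyGetD_neg_one_append_singleton, hR, hcl]
            have hA' : pvA (xs ++ [c]) = (S, x, y) := by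
              rw [hA]; simp [pvStepA, hR, hb]
            rw [hq, hA', pvNoop]
            exact ⟨⟨pre ++ [(x, y)], rfl⟩, (by show |(x : Int)| ≤ 5; rw [abs_le]; omega), (by show |(y : Int)| ≤ 5; rw [abs_le]; omega), hpre ▸ hinv⟩

        · by_cases hU : c = 'U'
          · by_cases hb : y < 5
            · have hcl : ¬ (5 < |(x : Int)| ∨ 5 < |(y + 1 : Int)|) := by
                simp only [not_or, not_lt, abs_le]; omega
              have hq : pvPath (xs ++ [c])
                  = (pre ++ [((x, y) : Int × Int)]) ++ [((x, y + 1) : Int × Int)] := by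
                apply hBform
                rw [hpre]
                simp [pvStepB, PySem.List.pyGetD_neg_one_append_singleton, hU, hcl]
              have hA' : pvA (xs ++ [c])
                  = (PySem.Set.add (PySem.Set.add S (x, y, x, y + 1)) (x, y + 1, x, y), x, y + 1) := by
                rw [hA]; simp [pvStepA, hU, hb]
              rw [hq, hA']
              refine ⟨⟨pre ++ [(x, y)], rfl⟩, (by show |(x : Int)| ≤ 5; rw [abs_le]; omega), (by show |(y + 1 : Int)| ≤ 5; rw [abs_le]; omega), ?_⟩
              exact pvAccept S pre x y (x) (y + 1) (by intro h; rw [Prod.mk.injEq] at h; omega) (hpre ▸ hinv)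

            · have hcl : (5 < |(x : Int)| ∨ 5 < |(y + 1 : Int)|) := by
                rcases hx with ⟨hx1, hx2⟩; rcases hy with ⟨hy1, hy2⟩
                rw [lt_abs, lt_abs]; omega
              have hq : pvPath (xs ++ [c])
                  = (pre ++ [((x, y) : Int × Int)]) ++ [((x, y) : Int × Int)] := by
                apply hBform
                rw [hpre]
                simp [pvStepB, PySem.List.pyGetD_neg_one_append_singleton, hU, hcl]
              have hA' : pvA (xs ++ [c]) = (S, x, y) := by
                rw [hA]; simp [pvStepA, hU, hb]
              rw [hq, hA', pvNoop]
              exact ⟨⟨pre ++ [(x, y)], rfl⟩, (by show |(x : Int)| ≤ 5; rw [abs_le]; omega), (by show |(y : Int)| ≤ 5; rw [abs_le]; omega), hpre ▸ hinv⟩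

          · by_cases hD : c = 'D'
            · by_cases hb : y > -5
              · have hcl : ¬ (5 < |(x : Int)| ∨ 5 < |(y - 1 : Int)|) := by
                  simp only [not_or, not_lt, abs_le]; omega
                have hq : pvPath (xs ++ [c])
                    = (pre ++ [((x, y) : Int × Int)]) ++ [((x, y - 1) : Int × Int)] := by
                  apply hBform
                  rw [hpre]
                  simp [pvStepB, PySem.List.pyGetD_neg_one_append_singleton, hD, hcl]
                have hA' : pvA (xs ++ [c])
                    = (PySem.Set.add (PySem.Set.add S (x, y, x, y - 1)) (x, y - 1, x, y), x, y - 1) := by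
                  rw [hA]; simp [pvStepA, hD, hb]
                rw [hq, hA']
                refine ⟨⟨pre ++ [(x, y)], rfl⟩, (by show |(x : Int)| ≤ 5; rw [abs_le]; omega), (by show |(y - 1 : Int)| ≤ 5; rw [abs_le]; omega), ?_⟩
                exact pvAccept S pre x y (x) (y - 1) (by intro h; rw [Prod.mk.injEq] at h; omega) (hpre ▸ hinv)

              · have hcl : (5 < |(x : Int)| ∨ 5 < |(y - 1 : Int)|) := by
                  rcases hx with ⟨hx1, hx2⟩; rcases hy with ⟨hy1, hy2⟩
                  rw [lt_abs, lt_abs]; omega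
                have hq : pvPath (xs ++ [c])
                    = (pre ++ [((x, y) : Int × Int)]) ++ [((x, y) : Int × Int)] := by
                  apply hBform
                  rw [hpre]
                  simp [pvStepB, PySem.List.pyGetD_neg_one_append_singleton, hD, hcl]
                have hA' : pvA (xs ++ [c]) = (S, x, y) := by
                  rw [hA]; simp [pvStepA, hD, hb]
                rw [hq, hA', pvNoop]
                exact ⟨⟨pre ++ [(x, y)], rfl⟩, (by show |(x : Int)| ≤ 5; rw [abs_le]; omega), (by show |(y : Int)| ≤ 5; rw [abs_le]; omega), hpre ▸ hinv⟩

            · have hcl : ¬ (5 < |(x : Int)| ∨ 5 < |(y : Int)|) := by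
                simp only [not_or, not_lt, abs_le]; omega
              have hq : pvPath (xs ++ [c])
                  = (pre ++ [((x, y) : Int × Int)]) ++ [((x, y) : Int × Int)] := by
                apply hBform
                rw [hpre]
                simp [pvStepB, PySem.List.pyGetD_neg_one_append_singleton, hL, hR, hU, hD, hcl]
              have hA' : pvA (xs ++ [c]) = (S, x, y) := by
                rw [hA]; simp [pvStepA, hL, hR, hU, hD]
              rw [hq, hA', pvNoop]
              exact ⟨⟨pre ++ [(x, y)], rfl⟩, (by show |(x : Int)| ≤ 5; rw [abs_le]; omega), (by show |(y : Int)| ≤ 5; rw [abs_le]; omega), hpre ▸ hinv⟩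

-- ===== VERDICT (by name: the statement is the Claim_ definition above) =====
theorem solution_spec : Claim_equal_solution := by
  intro dirs _
  unfold Spec_solution solution solution_alt
  dsimp only
  rw [PySem.List.slice_from_one]
  have hmain := pvMain dirs.toList
  obtain ⟨-, -, -, -, hlen⟩ := hmain
  have h1 : dirs.toList.foldl pvStepA (PySem.Set.empty, 0, 0) = pvA dirs.toList := rfl
  have h2 : dirs.toList.foldl pvStepB [((0 : Int), (0 : Int))] = pvPath dirs.toList := rfl
  have h3 : ((pvPath dirs.toList).zip (pvPath dirs.toList).tail).foldl pvAddEdge PySem.Set.empty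
      = pvEdges (pvPath dirs.toList) := rfl
  rw [h1, h2, h3, hlen]
  rw [PySem.Int.floordiv_eq_ediv_of_pos (by norm_num)]
  push_cast
  omega
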